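-- pv_equiv track=rewrite | github.com/Yaswanthsai888/kuku_storyteller | utils.py | assign_badge
-- ===== SOURCE A (Python) =====
-- def assign_badge(path):
--     """
--     Assigns a badge based on the choices made in the story path.
--     The path is a list of (scene_id, choice_text) tuples.
--     """
--     if not path:
--         return "Mystery Novice"
--
--     investigative_keywords = ["search", "investigate", "check", "question", "follow", "observe"]
--     action_keywords = ["chase", "confront", "alert", "join"]
--
--     investigative_count = sum(1 for _, choice in path if any(word in choice.lower() for word in investigative_keywords))
--     action_count = sum(1 for _, choice in path if any(word in choice.lower() for word in action_keywords))
--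
--     if investigative_count > action_count:
--         return "Master Detective"
--     elif action_count > investigative_count:
--         return "Dynamic Sleuth"
--     elif len(path) >= 4:  # Player reached a conclusion
--         return "Case Solver"
--     else:
--         return "Amateur Investigator"
-- ===== SOURCE B (Python) =====
-- def assign_badge(path):
--     if not path:
--         return "Mystery Novice"
--
--     investigative_keywords = ["search", "investigate", "check", "question", "follow", "observe"]
--     action_keywords = ["chase", "confront", "alert", "join"]
--
--     # Single signed score: +1 for an investigative match, -1 for an action match
--     # (a choice matching both contributes 0). The badge depends only on the sign
--     # of investigative_count - action_count, so the two counts are never kept.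
--     score = 0
--     for _, choice in path:
--         c = choice.lower()
--         score += any(w in c for w in investigative_keywords) - any(w in c for w in action_keywords)
--
--     if score > 0:
--         return "Master Detective"
--     if score < 0:
--         return "Dynamic Sleuth"
--     return "Case Solver" if len(path) >= 4 else "Amateur Investigator"
-- ===== Notes on version B (the rewrite author's own statement) =====
-- stated objective: simpler
-- what changed: B never computes the two per-category counts: it maintains one signed score (+1 investigative match, -1 action match per choice, one pass, one lower() per item) and picks the badge by the sign of the score, which equals the sign of investigative_count - action_count.
import Mathlib
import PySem

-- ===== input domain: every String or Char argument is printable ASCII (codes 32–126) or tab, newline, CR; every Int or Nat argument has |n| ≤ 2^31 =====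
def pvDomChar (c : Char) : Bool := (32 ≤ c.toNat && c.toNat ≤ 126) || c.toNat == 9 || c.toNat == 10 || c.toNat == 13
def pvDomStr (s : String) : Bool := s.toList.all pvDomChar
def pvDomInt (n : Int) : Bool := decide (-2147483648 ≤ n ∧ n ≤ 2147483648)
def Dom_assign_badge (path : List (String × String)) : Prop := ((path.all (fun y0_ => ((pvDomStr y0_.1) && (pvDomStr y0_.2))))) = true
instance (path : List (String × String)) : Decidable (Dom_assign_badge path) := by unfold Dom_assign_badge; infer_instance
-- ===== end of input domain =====

-- B replaces A's two per-category counts with one signed score (+1 investigative,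
-- -1 action per choice) and decides the badge by the sign of the score (objective: simpler).


-- ===== PORT A =====
def investigativeKeywords : List String :=
  ["search", "investigate", "check", "question", "follow", "observe"]
def actionKeywords : List String :=
  ["chase", "confront", "alert", "join"]

-- any(word in choice.lower() for word in kws)
def anyKeyword (kws : List String) (choice : String) : Bool :=
  kws.any (fun word => PySem.Str.isIn word (PySem.Str.lower choice))

def assign_badge (path : List (String × String)) : String :=
  if path = [] then "Mystery Novice"
  else
    let investigative_count : Int :=
      (path.map (fun p => if anyKeyword investigativeKeywords p.2 then (1 : Int) else 0)).sum
    let action_count : Int :=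
      (path.map (fun p => if anyKeyword actionKeywords p.2 then (1 : Int) else 0)).sum
    if investigative_count > action_count then "Master Detective"
    else if action_count > investigative_count then "Dynamic Sleuth"
    else if path.length ≥ 4 then "Case Solver"
    else "Amateur Investigator"

-- ===== PORT B =====
-- score += (investigative match) - (action match), Python bool arithmetic
def scoreStep (acc : Int) (p : String × String) : Int :=
  let c := PySem.Str.lower p.2
  acc + ((if investigativeKeywords.any (fun w => PySem.Str.isIn w c) then (1 : Int) else 0)
       - (if actionKeywords.any (fun w => PySem.Str.isIn w c) then (1 : Int) else 0))

def assign_badge_alt (path : List (String × String)) : String :=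
  if path = [] then "Mystery Novice"
  else
    let score := path.foldl scoreStep 0
    if score > 0 then "Master Detective"
    else if score < 0 then "Dynamic Sleuth"
    else if path.length ≥ 4 then "Case Solver"
    else "Amateur Investigator"

-- ===== PRECONDITION & SPEC =====
def Spec_assign_badge (path : List (String × String)) (out : String) : Prop := out = assign_badge_alt path
instance (path : List (String × String)) (out : String) : Decidable (Spec_assign_badge path out) := by unfold Spec_assign_badge; infer_instance

-- ===== CLAIM (what is proved, stated in full; the proofs are below) =====
def Claim_equal_assign_badge : Prop := ∀ (path : List (String × String)), Dom_assign_badge path → Spec_assign_badge path (assign_badge path)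

-- ===== LEMMAS AND PROOFS =====
-- The folded score equals (investigative sum) - (action sum).
theorem scoreStep_foldl (path : List (String × String)) (a : Int) :
    path.foldl scoreStep a =
      a + (path.map (fun p => if anyKeyword investigativeKeywords p.2 then (1 : Int) else 0)).sum
        - (path.map (fun p => if anyKeyword actionKeywords p.2 then (1 : Int) else 0)).sum := by
  induction path generalizing a with
  | nil => simp
  | cons hd tl ih =>
    simp only [List.foldl_cons, List.map_cons, List.sum_cons, scoreStep, anyKeyword]
    rw [ih]
    split_ifs <;> simp only [anyKeyword] <;> ring_nf

-- ===== VERDICT (by name: the statement is the Claim_ definition above) =====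
theorem assign_badge_spec : Claim_equal_assign_badge := by
  intro path _
  unfold Spec_assign_badge assign_badge assign_badge_alt
  rcases path with _ | ⟨hd, tl⟩
  · simp
  · simp only [reduceCtorEq, if_false]
    rw [scoreStep_foldl]
    set i := ((hd :: tl).map (fun p => if anyKeyword investigativeKeywords p.2 then (1 : Int) else 0)).sum
    set c := ((hd :: tl).map (fun p => if anyKeyword actionKeywords p.2 then (1 : Int) else 0)).sum
    split_ifs <;> first | rfl | omega
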